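-- pv_equiv track=rewrite | github.com/SSAFY-9-S4-STUDY/SWEAB | day26/P_152995/P_152995_seoJam.py | solution
-- ===== SOURCE A (Python) =====
-- def solution(scores):
--     wanho = scores.pop(0)
--     sum_wanho = sum(wanho)
--     answer, temp = 1, 0
--
--     for score in sorted(scores, key=lambda x: (-x[0], x[1])):
--         # [1] 완호가 인센티브 못받을 경우
--         if wanho[0] < score[0] and wanho[1] < score[1]:
--             return -1
--         # [2] 인센티브 못받는 사람 거르기
--         if score[1] < temp:
--             continue
--         # [3] 두 점수 합으로 석차 구하기
--         if sum_wanho < sum(score):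
--             answer += 1
--             temp = score[1]
--
--     return answer
-- ===== SOURCE B (Python) =====
-- def solution(scores):
--     wanho = scores.pop(0)
--     if any(wanho[0] < c[0] and wanho[1] < c[1] for c in scores):
--         return -1
--     sum_wanho = sum(wanho)
--     strong = [c for c in scores if sum_wanho < sum(c)]
--     return 1 + sum(1 for c in strong
--                    if not any(c[0] < d[0] and c[1] < d[1] for d in strong))
-- ===== Notes on version B (the rewrite author's own statement) =====
-- stated objective: simpler
-- what changed: B drops A's sort-and-sweep entirely: it checks 'someone strictly beats wanho in both scores' with one any() over the candidates and otherwise counts, among candidates whose score sum beats wanho's, those not strictly dominated in both scores by another such candidate, via direct nested scans; …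
-- outside the precondition, e.g. on solution([[0, 0], [5, -1]]): A returns 1, B returns 2
import Mathlib
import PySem

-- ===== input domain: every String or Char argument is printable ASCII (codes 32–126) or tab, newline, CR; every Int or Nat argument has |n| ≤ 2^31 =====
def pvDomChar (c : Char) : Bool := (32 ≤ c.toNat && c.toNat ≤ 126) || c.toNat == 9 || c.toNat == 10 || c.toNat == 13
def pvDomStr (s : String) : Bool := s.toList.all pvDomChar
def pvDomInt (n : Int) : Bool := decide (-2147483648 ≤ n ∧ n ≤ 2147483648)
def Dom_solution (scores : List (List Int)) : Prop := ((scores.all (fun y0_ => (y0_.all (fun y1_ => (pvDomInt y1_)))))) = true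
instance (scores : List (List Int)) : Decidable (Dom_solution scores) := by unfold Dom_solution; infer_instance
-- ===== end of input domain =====

-- B replaces A's sort-and-sweep by direct dominance scans (no sorting): simpler, not faster.
-- Like A, the Python B pops scores[0] (the caller observes the mutation); equivalence is about the return value.

-- ===== PORT A =====
-- the for-loop over sorted(scores, key=lambda x: (-x[0], x[1])) with the early 'return -1'
def solutionLoop (wanho : List Int) (sumW : Int) : List (List Int) → Int → Int → Int
  | [], answer, _temp => answer
  | score :: rest, answer, temp =>
    if PySem.List.pyGetD wanho 0 0 < PySem.List.pyGetD score 0 0 ∧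
       PySem.List.pyGetD wanho 1 0 < PySem.List.pyGetD score 1 0 then -1
    else if PySem.List.pyGetD score 1 0 < temp then
      solutionLoop wanho sumW rest answer temp
    else if sumW < score.sum then
      solutionLoop wanho sumW rest (answer + 1) (PySem.List.pyGetD score 1 0)
    else
      solutionLoop wanho sumW rest answer temp

def solution (scores : List (List Int)) : Int :=
  match scores with
  | [] => 0  -- scores.pop(0) raises IndexError here; excluded by Pre_solution
  | wanho :: rest =>
    solutionLoop wanho wanho.sum
      (PySem.List.sorted2 rest (fun x => -(PySem.List.pyGetD x 0 0))
        (fun x => PySem.List.pyGetD x 1 0)) 1 0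

-- ===== PORT B =====
def solution_alt (scores : List (List Int)) : Int :=
  match scores with
  | [] => 0  -- scores.pop(0) raises IndexError here; excluded by Pre_solution
  | wanho :: rest =>
    if rest.any (fun c => decide (PySem.List.pyGetD wanho 0 0 < PySem.List.pyGetD c 0 0) &&
                          decide (PySem.List.pyGetD wanho 1 0 < PySem.List.pyGetD c 1 0)) then -1
    else
      let sumW := wanho.sum
      let strong := rest.filter (fun c => decide (sumW < c.sum))
      1 + ((strong.filter (fun c => !(strong.any (fun d =>
              decide (PySem.List.pyGetD c 0 0 < PySem.List.pyGetD d 0 0) &&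
              decide (PySem.List.pyGetD c 1 0 < PySem.List.pyGetD d 1 0))))).length : Int)

-- ===== PRECONDITION & SPEC =====
-- Pre_ excludes (i) the inputs on which A raises IndexError: empty scores (pop on []), a short record
-- among the candidates (s[1] in the sort key), or a short wanho whose missing entries the comparisons
-- would reach; and (ii), when no candidate strictly beats wanho in both scores (otherwise both
-- programs answer -1 regardless), the corner where a candidate that actually affects the rank —
-- score sum above wanho's, not strictly dominated by another such candidate — has a negative second
-- score: there A's sweep, whose threshold starts at 0, and B's dominance count are both defensible
-- readings and disagree.
def Pre_solution (scores : List (List Int)) : Prop :=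
  scores ≠ [] ∧ (∀ s ∈ scores.tail, 2 ≤ s.length) ∧
    (2 ≤ (scores.headD []).length ∨ scores.tail = [] ∨
      ((scores.headD []).length = 1 ∧
        ∀ c ∈ scores.tail, PySem.List.pyGetD c 0 0 ≤ PySem.List.pyGetD (scores.headD []) 0 0)) ∧
    ((∃ c ∈ scores.tail,
        PySem.List.pyGetD (scores.headD []) 0 0 < PySem.List.pyGetD c 0 0 ∧
        PySem.List.pyGetD (scores.headD []) 1 0 < PySem.List.pyGetD c 1 0) ∨
      ∀ s ∈ scores.tail, (scores.headD []).sum < s.sum →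
        (∀ d ∈ scores.tail, ¬((scores.headD []).sum < d.sum ∧
          PySem.List.pyGetD s 0 0 < PySem.List.pyGetD d 0 0 ∧
          PySem.List.pyGetD s 1 0 < PySem.List.pyGetD d 1 0)) →
        0 ≤ PySem.List.pyGetD s 1 0)
instance (scores : List (List Int)) : Decidable (Pre_solution scores) := by
  unfold Pre_solution; infer_instance

def pvWitness_solution : List (List Int) := [[10, 20], [5, 5], [25, 4]]

def Spec_solution (scores : List (List Int)) (out : Int) : Prop := out = solution_alt scores
instance (scores : List (List Int)) (out : Int) : Decidable (Spec_solution scores out) := by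
  unfold Spec_solution; infer_instance

-- ===== CLAIM (what is proved, stated in full; the proofs are below) =====
def Claim_equal_solution : Prop := ∀ (scores : List (List Int)), Dom_solution scores → Pre_solution scores → Spec_solution scores (solution scores)

-- ===== LEMMAS AND PROOFS =====

-- record accessors (proof-side names for s[0], s[1])
def g0 (s : List Int) : Int := PySem.List.pyGetD s 0 0
def g1 (s : List Int) : Int := PySem.List.pyGetD s 1 0

-- sortedness relation of A's key (-x[0], x[1])
def keyRel (a b : List Int) : Prop := g0 b < g0 a ∨ (g0 a = g0 b ∧ g1 a ≤ g1 b)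

-- the candidates A counts: sum above wanho's and not strictly dominated by a stronger candidate in M
def goodB (sumW : Int) (M : List (List Int)) (c : List Int) : Bool :=
  decide (sumW < c.sum) &&
  !(M.any (fun d => decide (sumW < d.sum) && (decide (g0 c < g0 d) && decide (g1 c < g1 d))))

-- generic: insertion by a strict total "before" keeps the list pairwise-ordered
theorem pairwise_insertBy {α : Type} (lt : α → α → Bool)
    (asym : ∀ a b, lt a b = true → lt b a = false)
    (trans : ∀ a b c, lt a b = true → lt b c = true → lt a c = true)
    (x : α) (ys : List α) (h : ys.Pairwise (fun a b => lt b a = false)) :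
    (PySem.List.insertBy lt x ys).Pairwise (fun a b => lt b a = false) := by
  induction ys with
  | nil => simp [PySem.List.insertBy]
  | cons y ys ih =>
    rw [List.pairwise_cons] at h
    by_cases hxy : lt x y = true
    · rw [show PySem.List.insertBy lt x (y :: ys) = x :: y :: ys from by
        simp [PySem.List.insertBy, hxy]]
      refine List.Pairwise.cons ?_ (List.Pairwise.cons h.1 h.2)
      intro z hz
      rcases List.mem_cons.mp hz with rfl | hz
      · exact asym _ _ hxy
      · by_cases hzx : lt z x = true
        · have := trans _ _ _ hzx hxy
          rw [h.1 z hz] at this; exact absurd this (by simp)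
        · simpa using hzx
    · rw [show PySem.List.insertBy lt x (y :: ys) = y :: PySem.List.insertBy lt x ys from by
        simp [PySem.List.insertBy, hxy]]
      refine List.Pairwise.cons ?_ (ih h.2)
      intro z hz
      rcases (PySem.List.mem_insertBy lt x z ys).mp hz with rfl | hz
      · simpa using hxy
      · exact h.1 z hz

theorem pairwise_foldl_insertBy {α : Type} (lt : α → α → Bool)
    (asym : ∀ a b, lt a b = true → lt b a = false)
    (trans : ∀ a b c, lt a b = true → lt b c = true → lt a c = true) :
    ∀ (xs acc : List α), acc.Pairwise (fun a b => lt b a = false) →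
    (xs.foldl (fun acc x => PySem.List.insertBy lt x acc) acc).Pairwise
      (fun a b => lt b a = false) := by
  intro xs
  induction xs with
  | nil => intro acc h; simpa using h
  | cons x xs ih =>
    intro acc h
    simpa using ih _ (pairwise_insertBy lt asym trans x acc h)

-- the comparison sorted2 sorts by, for A's key
def lt2 (a b : List Int) : Bool :=
  decide (-(g0 a) < -(g0 b)) || (!decide (-(g0 b) < -(g0 a)) && decide (g1 a < g1 b))

theorem domb_false (sumW : Int) (c d : List Int)
    (h : ¬(sumW < d.sum ∧ g0 c < g0 d ∧ g1 c < g1 d)) :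
    ¬(decide (sumW < d.sum) = true ∧ decide (g0 c < g0 d) = true ∧ decide (g1 c < g1 d) = true) := by
  simp only [decide_eq_true_eq]; tauto

theorem any_perm {l1 l2 : List (List Int)} (h : l1.Perm l2) (p : List Int → Bool) :
    l1.any p = l2.any p := by
  simp only [List.any_eq]
  exact decide_eq_decide.mpr
    ⟨fun ⟨x, hx, hp⟩ => ⟨x, h.mem_iff.mp hx, hp⟩,
     fun ⟨x, hx, hp⟩ => ⟨x, h.mem_iff.mpr hx, hp⟩⟩

theorem sorted2_pairwise_keyRel (rest : List (List Int)) :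
    (PySem.List.sorted2 rest (fun x => -(PySem.List.pyGetD x 0 0))
      (fun x => PySem.List.pyGetD x 1 0)).Pairwise keyRel := by
  have h : (rest.foldl (fun acc x => PySem.List.insertBy lt2 x acc) []).Pairwise
      (fun a b => lt2 b a = false) := by
    refine pairwise_foldl_insertBy lt2 ?_ ?_ rest [] (by simp)
    · intro a b hab; simp only [lt2] at *; revert hab
      by_cases h1 : g0 a = g0 b <;> simp [h1] <;> omega
    · intro a b c hab hbc; simp only [lt2] at *; revert hab hbc
      by_cases h1 : g0 a = g0 b <;> by_cases h2 : g0 b = g0 c <;> simp [h1, h2] <;> omega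
  have he : PySem.List.sorted2 rest (fun x => -(PySem.List.pyGetD x 0 0))
      (fun x => PySem.List.pyGetD x 1 0) =
      rest.foldl (fun acc x => PySem.List.insertBy lt2 x acc) [] := by
    simp only [PySem.List.sorted2]
    rfl
  rw [he]
  refine h.imp ?_
  intro a b hab
  simp only [lt2, Bool.or_eq_false_iff, Bool.and_eq_false_iff, decide_eq_false_iff_not,
    Bool.not_eq_false', decide_eq_true_eq, keyRel] at hab ⊢
  omega

-- if some candidate strictly beats wanho, A's sweep returns -1
theorem loop_beaten (wanho : List Int) (sumW : Int) :
    ∀ (L : List (List Int)) (a temp : Int),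
    (∃ s ∈ L, g0 wanho < g0 s ∧ g1 wanho < g1 s) →
    solutionLoop wanho sumW L a temp = -1 := by
  intro L
  induction L with
  | nil => intro a temp h; simp at h
  | cons x rest ih =>
    intro a temp h
    rcases h with ⟨s, hs, hbeat⟩
    rcases List.mem_cons.mp hs with rfl | hs
    · simp only [solutionLoop, g0, g1] at *
      rw [if_pos hbeat]
    · simp only [solutionLoop]
      split
      · rfl
      · split
        · exact ih a temp ⟨s, hs, hbeat⟩
        · split
          · exact ih (a + 1) (PySem.List.pyGetD x 1 0) ⟨s, hs, hbeat⟩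
          · exact ih a temp ⟨s, hs, hbeat⟩

-- the sweep invariant: over a sorted tail L with processed prefix P and threshold temp,
-- A's loop counts exactly the goodB candidates of L
theorem loop_count (wanho : List Int) (sumW : Int) :
    ∀ (L P : List (List Int)) (a temp : Int),
    (P ++ L).Pairwise keyRel →
    (∀ s ∈ P ++ L, ¬(g0 wanho < g0 s ∧ g1 wanho < g1 s)) →
    (∀ s ∈ P ++ L, sumW < s.sum →
      (∀ d ∈ P ++ L, ¬(sumW < d.sum ∧ g0 s < g0 d ∧ g1 s < g1 d)) → 0 ≤ g1 s) →
    0 ≤ temp →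
    (∀ d ∈ P, sumW < d.sum → g1 d ≤ temp) →
    (temp = 0 ∨ ∃ e ∈ P, sumW < e.sum ∧ g1 e = temp) →
    solutionLoop wanho sumW L a temp = a + (L.countP (goodB sumW (P ++ L)) : Int) := by
  intro L
  induction L with
  | nil => intro P a temp _ _ _ _ _ _; simp [solutionLoop]
  | cons x rest ih =>
    intro P a temp hsort hnb hnn htemp hP hinv
    have hx : x ∈ P ++ x :: rest := by simp
    have hxnb : ¬(g0 wanho < g0 x ∧ g1 wanho < g1 x) := hnb x hx
    have hquad := List.pairwise_append.mp hsort
    have hcons := List.pairwise_cons.mp hquad.2.1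
    simp only [solutionLoop]
    rw [if_neg (by simpa [g0, g1] using hxnb)]
    have hassoc : P ++ x :: rest = (P ++ [x]) ++ rest := by simp
    by_cases hskip : PySem.List.pyGetD x 1 0 < temp
    · -- skipped: x1 < temp; x is not counted by B either
      rw [if_pos hskip]
      have hx1 : g1 x < temp := hskip
      have hgx : goodB sumW (P ++ x :: rest) x = false := by
        rcases hinv with rfl | ⟨e, heP, hes, he1⟩
        · -- temp = 0: a strong x with x1 < 0 must be strictly dominated, so B skips it too
          by_cases hs : sumW < x.sum
          · by_cases hdomx : ∀ d ∈ P ++ x :: rest, ¬(sumW < d.sum ∧ g0 x < g0 d ∧ g1 x < g1 d)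
            · have := hnn x hx hs hdomx; omega
            · push Not at hdomx
              rcases hdomx with ⟨d, hd, hds, hd0, hd1⟩
              simp only [goodB, Bool.and_eq_false_iff, Bool.not_eq_false', List.any_eq_true]
              right
              exact ⟨d, hd, by simp [hds, hd0, hd1]⟩
          · simp [goodB, hs]
        · -- temp = e1 for a counted strong e, which strictly dominates x
          have hkey : keyRel e x := hquad.2.2 e heP x (by simp)
          have hdom : g0 x < g0 e ∧ g1 x < g1 e := by
            rcases hkey with h | ⟨h, h'⟩
            · exact ⟨h, by omega⟩
            · omega
          simp only [goodB, Bool.and_eq_false_iff, Bool.not_eq_false', List.any_eq_true]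
          right
          exact ⟨e, by simp [heP], by simp [hes, hdom.1, hdom.2]⟩
      rw [List.countP_cons, hgx, if_neg (by simp)]
      rw [hassoc] at hsort hnb hnn ⊢
      refine (ih (P ++ [x]) a temp hsort hnb hnn htemp ?_ ?_).trans (by push_cast; ring)
      · intro d hd hds
        rcases List.mem_append.mp hd with hd | hd
        · exact hP d hd hds
        · simp at hd; subst hd; exact le_of_lt hx1
      · rcases hinv with h | ⟨e, heP, he⟩
        · exact Or.inl h
        · exact Or.inr ⟨e, by simp [heP], he⟩
    · rw [if_neg hskip]
      have hx1 : temp ≤ g1 x := by simpa [g1] using not_lt.mp hskip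
      by_cases hstrong : sumW < x.sum
      · -- counted: x is good, temp becomes x1
        rw [if_pos hstrong]
        have hnodom : ∀ d ∈ P ++ x :: rest, ¬(sumW < d.sum ∧ g0 x < g0 d ∧ g1 x < g1 d) := by
          intro d hd
          rcases List.mem_append.mp hd with hd | hd
          · by_cases hds : sumW < d.sum
            · have := hP d hd hds; omega
            · intro hcon; exact hds hcon.1
          · rcases List.mem_cons.mp hd with rfl | hd
            · omega
            · have hkey : keyRel x d := hcons.1 d hd
              rcases hkey with h | ⟨h, _⟩ <;> omega
        have hgx : goodB sumW (P ++ x :: rest) x = true := by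
          simp only [goodB, Bool.and_eq_true, Bool.not_eq_true', List.any_eq_false]
          exact ⟨by simpa using hstrong, fun d hd => domb_false sumW x d (hnodom d hd)⟩
        rw [List.countP_cons, hgx, if_pos rfl]
        rw [hassoc] at hsort hnb hnn ⊢
        have hrec := ih (P ++ [x]) (a + 1) (PySem.List.pyGetD x 1 0) hsort hnb hnn
          (by have := hnn x (by simp) hstrong (hassoc ▸ hnodom); simpa [g1] using this)
          (by intro d hd hds
              rcases List.mem_append.mp hd with hd | hd
              · have := hP d hd hds; simp only [g1] at *; omega
              · simp at hd; subst hd; simp [g1])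
          (Or.inr ⟨x, by simp, hstrong, rfl⟩)
        rw [hrec]; push_cast; ring
      · -- passed over: not strong, temp unchanged
        rw [if_neg hstrong]
        have hgx : goodB sumW (P ++ x :: rest) x = false := by
          simp [goodB, hstrong]
        rw [List.countP_cons, hgx, if_neg (by simp)]
        rw [hassoc] at hsort hnb hnn ⊢
        refine (ih (P ++ [x]) a temp hsort hnb hnn htemp ?_ ?_).trans (by push_cast; ring)
        · intro d hd hds
          rcases List.mem_append.mp hd with hd | hd
          · exact hP d hd hds
          · simp at hd; subst hd; exact absurd hds hstrong
        · rcases hinv with h | ⟨e, heP, he⟩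
          · exact Or.inl h
          · exact Or.inr ⟨e, by simp [heP], he⟩

-- B's count, written as a countP over rest
theorem alt_count (wanho : List Int) (rest : List (List Int)) :
    (((rest.filter (fun c => decide (wanho.sum < c.sum))).filter
        (fun c => !((rest.filter (fun c => decide (wanho.sum < c.sum))).any (fun d =>
          decide (PySem.List.pyGetD c 0 0 < PySem.List.pyGetD d 0 0) &&
          decide (PySem.List.pyGetD c 1 0 < PySem.List.pyGetD d 1 0))))).length : Int)
    = (rest.countP (goodB wanho.sum rest) : Int) := by
  rw [← List.countP_eq_length_filter, List.countP_filter]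
  congr 1
  refine List.countP_congr ?_
  intro c _
  simp only [goodB, List.any_filter, g0, g1]
  rw [Bool.and_comm]
  rfl

-- ===== VERDICT (by name: the statement is the Claim_ definition above) =====
theorem solution_spec : Claim_equal_solution := by
  intro scores _hdom hpre
  unfold Spec_solution
  rcases hpre with ⟨hne, hlen, hwan, hall⟩
  match scores with
  | [] => exact absurd rfl hne
  | wanho :: rest =>
    set M := PySem.List.sorted2 rest (fun x => -(PySem.List.pyGetD x 0 0))
      (fun x => PySem.List.pyGetD x 1 0) with hM
    have hperm : M.Perm rest := PySem.List.sorted2_perm _ _ _ _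
    by_cases hb : rest.any (fun c => decide (PySem.List.pyGetD wanho 0 0 < PySem.List.pyGetD c 0 0) &&
        decide (PySem.List.pyGetD wanho 1 0 < PySem.List.pyGetD c 1 0)) = true
    · -- someone strictly beats wanho: both return -1
      rcases List.any_eq_true.mp hb with ⟨c, hc, hcb⟩
      simp only [Bool.and_eq_true, decide_eq_true_eq] at hcb
      have : solutionLoop wanho wanho.sum M 1 0 = -1 :=
        loop_beaten wanho wanho.sum M 1 0 ⟨c, hperm.mem_iff.mpr hc, hcb⟩
      simp only [solution, solution_alt, hb, if_true, ← hM]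
      exact this
    · -- nobody beats wanho: count the non-dominated strong candidates
      have hnb : ∀ s ∈ ([] : List (List Int)) ++ M, ¬(g0 wanho < g0 s ∧ g1 wanho < g1 s) := by
        intro s hs
        have hs' : s ∈ rest := hperm.mem_iff.mp (by simpa using hs)
        have := List.any_eq_false.mp (Bool.not_eq_true _ ▸ hb) s hs'
        simpa [g0, g1] using this
      have hnn : ∀ s ∈ ([] : List (List Int)) ++ M, wanho.sum < s.sum →
          (∀ d ∈ ([] : List (List Int)) ++ M, ¬(wanho.sum < d.sum ∧ g0 s < g0 d ∧ g1 s < g1 d)) →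
          0 ≤ g1 s := by
        intro s hs hsum hnd
        have hs' : s ∈ rest := hperm.mem_iff.mp (by simpa using hs)
        rcases hall with ⟨c, hc, hcb⟩ | hall
        · -- contradicts 'nobody beats wanho'
          refine absurd (List.any_eq_true.mpr ⟨c, by simpa using hc, ?_⟩) hb
          simp only [Bool.and_eq_true, decide_eq_true_eq]
          exact ⟨by simpa using hcb.1, by simpa using hcb.2⟩
        · refine hall s (by simpa using hs') (by simpa using hsum) ?_
          intro d hd
          have hd' : d ∈ ([] : List (List Int)) ++ M :=
            by simpa using hperm.mem_iff.mpr (by simpa using hd)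
          have := hnd d hd'
          simpa [g0, g1] using this
      have hcount := loop_count wanho wanho.sum M [] 1 0
        (by simpa using sorted2_pairwise_keyRel rest) hnb hnn le_rfl
        (by intro d hd; simp at hd) (Or.inl rfl)
      simp only [List.nil_append] at hcount
      have hgood : ∀ c, goodB wanho.sum M c = goodB wanho.sum rest c := by
        intro c
        simp only [goodB, any_perm hperm]
      have hcnt2 : (M.countP (goodB wanho.sum M) : Int) = (rest.countP (goodB wanho.sum rest) : Int) := by
        rw [List.countP_congr (fun x _ => by rw [hgood x]), hperm.countP_eq]
      simp only [solution, solution_alt, hb, if_false, ← hM, Bool.false_eq_true]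
      rw [hcount, hcnt2, ← alt_count wanho rest]
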